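-- pv_equiv track=rewrite | github.com/popphylotools/HiMAP_v2 | himap/parse_msa.py | find_exon_spans
-- ===== SOURCE A (Python) =====
-- def find_exon_spans(seq, intron_spans):
--     length = len(seq)
--
--     if len(intron_spans) == 0:
--         return [(0, length)]
--
--     elif len(intron_spans) == 1:
--         bp = intron_spans[0]
--         return [(0, bp[0]), (bp[1], length)]
--
--     elif len(intron_spans) > 1:
--         exonCoords = [(0, intron_spans[0][0])]  # first exon
--
--         for i in list(range(len(intron_spans) + 1))[1:-1]:  # all intermediate exons
--             ex_start = intron_spans[i - 1][1]
--             ex_end = intron_spans[i][0]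
--             exonCoords.append((ex_start, ex_end))
--
--         exonCoords.append((intron_spans[-1][1], length))  # last exon
--         return exonCoords
-- ===== SOURCE B (Python) =====
-- def find_exon_spans(seq, intron_spans):
--     points = [0]
--     for s, e in intron_spans:
--         points.append(s)
--         points.append(e)
--     points.append(len(seq))
--     return [(points[i], points[i + 1]) for i in range(0, len(points), 2)]
-- ===== Notes on version B (the rewrite author's own statement) =====
-- stated objective: simpler
-- what changed: Replaces A's three-way case analysis (0/1/many introns) and index-based middle loop with a single uniform pass: build one flat boundary list [0, s1, e1, ..., sk, ek, len(seq)] and pair adjacent boundaries two at a time.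
import Mathlib
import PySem

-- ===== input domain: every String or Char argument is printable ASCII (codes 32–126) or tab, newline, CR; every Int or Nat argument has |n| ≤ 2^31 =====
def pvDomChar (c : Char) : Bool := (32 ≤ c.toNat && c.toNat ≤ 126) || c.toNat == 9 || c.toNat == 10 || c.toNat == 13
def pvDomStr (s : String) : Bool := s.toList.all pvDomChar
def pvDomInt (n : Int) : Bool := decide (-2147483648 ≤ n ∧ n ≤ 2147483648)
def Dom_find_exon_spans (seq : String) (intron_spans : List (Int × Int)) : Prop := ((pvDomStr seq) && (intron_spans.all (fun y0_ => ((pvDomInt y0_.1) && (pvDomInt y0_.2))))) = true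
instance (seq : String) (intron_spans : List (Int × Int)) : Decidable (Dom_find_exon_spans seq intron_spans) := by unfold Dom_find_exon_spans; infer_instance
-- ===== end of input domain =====

-- B replaces A's three-way case analysis with one uniform boundary-list-then-pair pass (objective: simpler).


-- ===== PORT A =====
def find_exon_spans (seq : String) (intron_spans : List (Int × Int)) : List (Int × Int) :=
  let length : Int := PySem.Str.len seq
  if intron_spans.length == 0 then
    [(0, length)]
  else if intron_spans.length == 1 then
    let bp := PySem.List.pyGetD intron_spans 0 (0, 0)
    [(0, bp.1), (bp.2, length)]
  else
    let exonCoords : List (Int × Int) := [(0, (PySem.List.pyGetD intron_spans 0 (0, 0)).1)]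
    let idxs := PySem.List.slice (PySem.List.pyRange 0 ((intron_spans.length : Int) + 1) 1) (some 1) (some (-1))
    let exonCoords := idxs.foldl (fun acc i =>
      acc ++ [((PySem.List.pyGetD intron_spans (i - 1) (0, 0)).2,
               (PySem.List.pyGetD intron_spans i (0, 0)).1)]) exonCoords
    exonCoords ++ [((PySem.List.pyGetD intron_spans (-1) (0, 0)).2, length)]

-- ===== PORT B =====
-- the comprehension '[(points[i], points[i+1]) for i in range(0, len(points), 2)]' as structural recursion two at a time
def pvPairUp : List Int → List (Int × Int)
  | a :: b :: rest => (a, b) :: pvPairUp rest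
  | _ => []

def find_exon_spans_alt (seq : String) (intron_spans : List (Int × Int)) : List (Int × Int) :=
  let points : List Int :=
    (intron_spans.foldl (fun acc p => acc ++ [p.1, p.2]) [0]) ++ [(PySem.Str.len seq : Int)]
  pvPairUp points

-- ===== PRECONDITION & SPEC =====
def Spec_find_exon_spans (seq : String) (intron_spans : List (Int × Int)) (out : List (Int × Int)) : Prop := out = find_exon_spans_alt seq intron_spans
instance (seq : String) (intron_spans : List (Int × Int)) (out : List (Int × Int)) : Decidable (Spec_find_exon_spans seq intron_spans out) := by unfold Spec_find_exon_spans; infer_instance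

-- ===== CLAIM (what is proved, stated in full; the proofs are below) =====
def Claim_equal_find_exon_spans : Prop := ∀ (seq : String) (intron_spans : List (Int × Int)), Dom_find_exon_spans seq intron_spans → Spec_find_exon_spans seq intron_spans (find_exon_spans seq intron_spans)

-- ===== LEMMAS AND PROOFS =====

-- common reference shape: (prev, s1) :: (e1, s2) :: … :: (ek, len)
def pvExons (prev : Int) : List (Int × Int) → Int → List (Int × Int)
  | [], len => [(prev, len)]
  | (s, e) :: rest, len => (prev, s) :: pvExons e rest len

-- adjacent-pairs part shared by the A-side characterisation
def pvAdj : List (Int × Int) → List (Int × Int)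
  | x :: y :: r => (x.2, y.1) :: pvAdj (y :: r)
  | _ => []

theorem pvPairUp_flat (l : List (Int × Int)) (prev L : Int) :
    pvPairUp (prev :: (l.flatMap (fun p => [p.1, p.2]) ++ [L])) = pvExons prev l L := by
  induction l generalizing prev with
  | nil => simp [pvPairUp, pvExons]
  | cons p rest ih => cases p; simp [pvPairUp, pvExons, ih]

theorem alt_eq_exons (seq : String) (l : List (Int × Int)) :
    find_exon_spans_alt seq l = pvExons 0 l (PySem.Str.len seq) := by
  unfold find_exon_spans_alt
  rw [PySem.List.foldl_append_eq_flatMap]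
  simpa using pvPairUp_flat l 0 (PySem.Str.len seq)

theorem exons_shape (prev L : Int) (l : List (Int × Int)) (h : l ≠ []) :
    pvExons prev l L = (prev, (l.headI).1) :: (pvAdj l ++ [((l.getLast h).2, L)]) := by
  induction l generalizing prev with
  | nil => exact absurd rfl h
  | cons p rest ih =>
    cases p with
    | mk s e =>
      cases rest with
      | nil => simp [pvExons, pvAdj]
      | cons q r =>
        rw [show pvExons prev ((s, e) :: q :: r) L = (prev, s) :: pvExons e (q :: r) L from rfl]
        rw [ih e (by simp)]
        simp [pvAdj, List.headI, List.getLast]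

theorem map_idx_adj (p : Int × Int) (l : List (Int × Int)) :
    (PySem.List.pyRange 1 ((p :: l).length : Int) 1).map
      (fun i => ((PySem.List.pyGetD (p :: l) (i - 1) (0, 0)).2,
                 (PySem.List.pyGetD (p :: l) i (0, 0)).1))
    = pvAdj (p :: l) := by
  induction l generalizing p with
  | nil => simp [PySem.List.pyRange_one_eq_nil, pvAdj]
  | cons q r ih =>
    rw [PySem.List.pyRange_one_cons (by push_cast [List.length_cons]; omega)]
    simp only [List.map_cons]
    have h1 : ((PySem.List.pyGetD (p :: q :: r) (1 - 1) (0, 0)).2,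
               (PySem.List.pyGetD (p :: q :: r) (1 : Int) (0, 0)).1) = (p.2, q.1) := by
      norm_num
      all_goals simp [pysem]
    rw [h1]
    show _ = pvAdj (p :: q :: r)
    rw [pvAdj]
    congr 1
    rw [← ih q]
    -- shift the index range by one
    rw [PySem.List.pyRange_one, PySem.List.pyRange_one]
    rw [List.map_map, List.map_map]
    have hlen : (((q :: r).length : Int) - 1).toNat = (((p :: q :: r).length : Int) - 2).toNat := by
      simp; omega
    rw [hlen]
    apply List.map_congr_left
    intro k _
    simp only [Function.comp]
    have e1 : (1 : Int) + 1 + k - 1 = ((k + 1 : Nat) : Int) := by push_cast; ring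
    have e2 : (1 : Int) + 1 + k = ((k + 2 : Nat) : Int) := by push_cast; ring
    have e3 : (1 : Int) + k - 1 = ((k : Nat) : Int) := by omega
    have e4 : (1 : Int) + k = ((k + 1 : Nat) : Int) := by push_cast; ring
    rw [e1, e2, e3, e4]
    rw [PySem.List.pyGetD_natCast, PySem.List.pyGetD_natCast,
        PySem.List.pyGetD_natCast, PySem.List.pyGetD_natCast]
    simp [List.getD]

theorem slice_one_negone (xs : List Int) :
    PySem.List.slice xs (some 1) (some (-1)) = xs.tail.dropLast := by
  simp only [PySem.List.slice, Int.reduceNeg, Order.lt_one_iff, PySem.List.clampIdx_neg_ofNat,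
    zero_le_one, PySem.List.clampIdx_of_nonneg, Int.toNat_one]
  cases xs with
  | nil => simp
  | cons a l => simp [List.dropLast_eq_take]

theorem slice_mid (m : Nat) (hm : 1 ≤ m) :
    PySem.List.slice (PySem.List.pyRange 0 ((m : Int) + 1) 1) (some 1) (some (-1))
    = PySem.List.pyRange 1 (m : Int) 1 := by
  rw [slice_one_negone]
  rw [PySem.List.pyRange_one_cons (by positivity)]
  rw [List.tail_cons]
  rw [PySem.List.pyRange_one_succ_right (by exact_mod_cast hm)]
  exact List.dropLast_concat

theorem getD_neg_one_getLast (l : List (Int × Int)) (h : l ≠ []) :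
    PySem.List.pyGetD l (-1) (0, 0) = l.getLast h := by
  simp [PySem.List.pyGetD, PySem.List.pyGet?, PySem.List.pyIdx?]
  rw [if_pos (by cases l; exact absurd rfl h; simp)]
  simp
  rw [List.getElem?_eq_getElem (by cases l; exact absurd rfl h; simp)]
  simp [List.getLast_eq_getElem]

theorem a_eq_exons (seq : String) (l : List (Int × Int)) :
    find_exon_spans seq l = pvExons 0 l (PySem.Str.len seq) := by
  unfold find_exon_spans
  cases l with
  | nil => simp [pvExons]
  | cons p rest =>
    cases rest with
    | nil =>
      cases p with
      | mk s e =>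
        simp [pvExons, pysem]
    | cons q r =>
      simp only [List.length_cons, beq_iff_eq]
      rw [if_neg (by omega), if_neg (by omega)]
      have hm : ((r.length + 1 + 1 : Nat) : Int) = ((r.length + 2 : Nat) : Int) := by push_cast; ring
      rw [hm, slice_mid (r.length + 2) (by omega)]
      have hlen : ((r.length + 2 : Nat) : Int) = ((p :: q :: r).length : Int) := by simp; ring
      rw [hlen]
      rw [PySem.List.foldl_append_singleton_eq_map]
      rw [map_idx_adj p (q :: r)]
      rw [getD_neg_one_getLast (p :: q :: r) (by simp)]
      have a0 : PySem.List.pyGetD (p :: q :: r) (0 : Int) (0, 0) = p := by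
        simp [pysem]
      rw [a0]
      rw [exons_shape 0 (PySem.Str.len seq) (p :: q :: r) (by simp)]
      simp [List.headI]

-- ===== VERDICT (by name: the statement is the Claim_ definition above) =====
theorem find_exon_spans_spec : Claim_equal_find_exon_spans := by
  intro seq l _
  unfold Spec_find_exon_spans
  rw [a_eq_exons, alt_eq_exons]
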